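-- pv_equiv track=rewrite | github.com/miliar/Code_Jam_Webscraper | Solutions_python/Problem_178/1724.py | solve
-- ===== SOURCE A (Python) =====
-- def flip_symbol(c):
--     return '+' if c == '-' else '-'
--
-- def solve(S):
--     toflip = '-'
--     toskip = '+'
--     N = 0
--     for c in reversed(S):
--         if c == toskip:
--             continue
--         if c == toflip:
--             N += 1
--             toflip = flip_symbol(toflip)
--             toskip = c
--     return N
-- ===== SOURCE B (Python) =====
-- def solve(S):
--     seq = [c for c in S if c in '+-']
--     n = 0
--     prev = None
--     for c in seq:
--         if prev is not None and c != prev: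
--             n += 1
--         prev = c
--     if seq and seq[-1] == '-':
--         n += 1
--     return n
-- ===== Notes on version B (the rewrite author's own statement) =====
-- stated objective: alternative
-- what changed: B replaces A's backward toggling scan (toflip/toskip state machine over reversed(S)) with a single forward pass that counts adjacent sign transitions among the '+'/'-' characters plus 1 if the last such character is '-'.
import Mathlib
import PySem

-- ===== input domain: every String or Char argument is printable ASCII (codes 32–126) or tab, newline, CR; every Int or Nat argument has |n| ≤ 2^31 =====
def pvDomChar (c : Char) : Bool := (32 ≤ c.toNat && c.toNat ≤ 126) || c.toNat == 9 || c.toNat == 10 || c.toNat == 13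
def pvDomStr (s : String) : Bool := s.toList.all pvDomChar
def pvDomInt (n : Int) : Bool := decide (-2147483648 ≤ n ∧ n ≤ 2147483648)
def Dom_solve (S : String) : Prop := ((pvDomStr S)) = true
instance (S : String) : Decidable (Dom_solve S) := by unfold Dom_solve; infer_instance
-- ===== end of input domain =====

-- B counts sign transitions on the '+'/'-' subsequence in one forward pass (plus a final '-' adjustment)
-- instead of A's backward toggling scan; objective: alternative decomposition, same cost.

-- ===== PORT A =====
def flipSymbol (c : Char) : Char := if c = '-' then '+' else '-'

-- the 'for c in reversed(S)' loop of A, state (toflip, toskip, N)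
def solveLoopA : List Char → Char → Char → Int → Int
  | [], _, _, N => N
  | c :: rest, toflip, toskip, N =>
    if c = toskip then solveLoopA rest toflip toskip N
    else if c = toflip then solveLoopA rest (flipSymbol toflip) c (N + 1)
    else solveLoopA rest toflip toskip N

def solve (S : String) : Int := solveLoopA S.toList.reverse '-' '+' 0

-- ===== PORT B =====
-- 'c in '+-''
def isPM (c : Char) : Bool := c = '+' || c = '-'

-- forward pass over seq, state (n, prev)
def solveLoopB : List Char → Int → Option Char → Int × Option Char
  | [], n, prev => (n, prev)
  | c :: rest, n, prev =>
    solveLoopB rest (if (match prev with | some p => decide (c ≠ p) | none => false) then n + 1 else n) (some c)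

def solve_alt (S : String) : Int :=
  let seq := S.toList.filter isPM
  let n := (solveLoopB seq 0 none).1
  if seq ≠ [] ∧ seq.getLast? = some '-' then n + 1 else n

-- ===== PRECONDITION & SPEC =====
def Spec_solve (S : String) (out : Int) : Prop := out = solve_alt S
instance (S : String) (out : Int) : Decidable (Spec_solve S out) := by unfold Spec_solve; infer_instance

-- ===== CLAIM (what is proved, stated in full; the proofs are below) =====
def Claim_equal_solve : Prop := ∀ (S : String), Dom_solve S → Spec_solve S (solve S)

-- ===== LEMMAS AND PROOFS =====\n
-- number of adjacent differing pairs
def transCnt : List Char → Int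
  | [] => 0
  | [_] => 0
  | a :: b :: r => (if a ≠ b then 1 else 0) + transCnt (b :: r)

-- A's loop on the filtered list, toskip eliminated (always flipSymbol toflip)
def cnt : List Char → Char → Int
  | [], _ => 0
  | c :: r, t => if c = t then 1 + cnt r (flipSymbol t) else cnt r t

lemma solveLoopA_char (l : List Char) : ∀ (t : Char) (N : Int), (t = '+' ∨ t = '-') →
    solveLoopA l t (flipSymbol t) N = N + cnt (l.filter isPM) t := by
  induction l with
  | nil => intro t N _; simp [solveLoopA, cnt]
  | cons c r ih =>
    intro t N ht
    by_cases hskip : c = flipSymbol t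
    · have hpm : isPM c := by rcases ht with h | h <;> simp [h, flipSymbol, isPM, hskip]
      have hct : c ≠ t := by rcases ht with h | h <;> subst h <;> simp [flipSymbol] at hskip <;> simp [hskip] <;> decide
      simp only [solveLoopA, if_pos hskip]
      rw [ih t N ht]
      simp [hpm, cnt, hct]
    · by_cases hc : c = t
      · have hpm : isPM c := by rcases ht with h | h <;> simp [isPM, hc, h]
        simp only [solveLoopA, if_neg hskip, if_pos hc]
        have htt : flipSymbol t = '+' ∨ flipSymbol t = '-' := by
          rcases ht with h | h <;> simp [h, flipSymbol]
        subst hc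
        have hflip : flipSymbol (flipSymbol c) = c := by
          rcases ht with h | h <;> simp [h, flipSymbol]
        have h2 := ih (flipSymbol c) (N + 1) htt
        rw [hflip] at h2
        rw [h2]
        simp [hpm, cnt]
        try ring
      · have hpm : isPM c = false := by
          rcases ht with h | h <;> subst h <;>
            simp [isPM, flipSymbol] at hskip ⊢ <;> simp [hc, hskip]
        simp only [solveLoopA, if_neg hskip, if_neg hc]
        rw [ih t N ht]
        simp [hpm]

-- cnt on a binary list = transitions + (head = t)
lemma cnt_char (l : List Char) : ∀ t, (t = '+' ∨ t = '-') → (∀ c ∈ l, isPM c) →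
    cnt l t = transCnt l + (if l.head? = some t then 1 else 0) := by
  induction l with
  | nil => intro t _ _; simp [cnt, transCnt]
  | cons c r ih =>
    intro t ht hl
    have hcpm : isPM c := hl c (by simp)
    have hrl : ∀ x ∈ r, isPM x := fun x hx => hl x (by simp [hx])
    by_cases hc : c = t
    · subst hc
      have hflipne : flipSymbol c ≠ c := by rcases ht with h | h <;> simp [h, flipSymbol]
      have htt : flipSymbol c = '+' ∨ flipSymbol c = '-' := by
        rcases ht with h | h <;> simp [h, flipSymbol]
      rw [show cnt (c :: r) c = 1 + cnt r (flipSymbol c) by simp [cnt]]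
      rw [ih (flipSymbol c) htt hrl]
      cases r with
      | nil => simp [transCnt]
      | cons b s =>
        have hbpm : isPM b := hrl b (by simp)
        have hbc : (b :: s).head? = some (flipSymbol c) ↔ b ≠ c := by
          rcases ht with h | h <;> subst h <;>
            simp [flipSymbol] <;>
            (revert hbpm; simp [isPM]; rcases Decidable.em (b = '+') with hb | hb <;> simp [hb] <;> intro h2 <;> simp [h2] <;> decide)
        rw [show transCnt (c :: b :: s) = (if c ≠ b then 1 else 0) + transCnt (b :: s) from rfl]
        by_cases hbcne : b = c
        · simp [hbc, hbcne, Ne.symm hflipne]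
          try ring
        · have hbf : b = flipSymbol c := by simpa using hbc.mpr hbcne
          simp [hbf, Ne.symm hbcne, Ne.symm hflipne]
          try ring
    · -- c ≠ t, both binary ⇒ c = flipSymbol t, so head ≠ t branch
      rw [show cnt (c :: r) t = cnt r t from by simp [cnt, hc]]
      rw [ih t ht hrl]
      cases r with
      | nil => simp [transCnt, hc]
      | cons b s =>
        have hbt : (b :: s).head? = some t ↔ b = t := by simp
        have hcb : c ≠ b ↔ b = t := by
          have hcf : c = flipSymbol t := by
            rcases ht with h | h <;> subst h <;> (revert hcpm; simp [isPM, flipSymbol]; intro h2; rcases h2 with h2 | h2 <;> simp [h2] at hc ⊢ <;> try exact absurd h2 hc)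
          subst hcf
          have hbpm : isPM b := hrl b (by simp)
          rcases ht with h | h <;> subst h <;>
            (revert hbpm; simp [isPM, flipSymbol]; rcases Decidable.em (b = '+') with hb | hb <;> simp [hb] <;> intro h2 <;> simp [h2] <;> decide)
        rw [show transCnt (c :: b :: s) = (if c ≠ b then 1 else 0) + transCnt (b :: s) from rfl]
        by_cases hb : b = t
        · simp [hbt, hb, hcb.mpr hb, hc]
          try ring
        · have hcbe : ¬ c ≠ b := by by_contra hne; exact hb (hcb.mp (by simpa using hne))
          simp [hbt, hb, hcbe, hc]

-- transCnt of an appended element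
lemma transCnt_append (l : List Char) (a : Char) :
    transCnt (l ++ [a]) = transCnt l + (match l.getLast? with | some b => if a ≠ b then (1 : Int) else 0 | none => 0) := by
  induction l with
  | nil => simp [transCnt]
  | cons c r ih =>
    cases r with
    | nil => simp [transCnt]; by_cases h : a = c <;> simp [h, Ne.symm]
    | cons b s =>
      rw [show (c :: b :: s) ++ [a] = c :: ((b :: s) ++ [a]) from rfl]
      rw [show transCnt (c :: (b :: s ++ [a])) = (if c ≠ b then 1 else 0) + transCnt (b :: s ++ [a]) from rfl]
      rw [ih]
      rw [show transCnt (c :: b :: s) = (if c ≠ b then 1 else 0) + transCnt (b :: s) from rfl]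
      simp [List.getLast?_cons_cons]
      ring

lemma transCnt_reverse (l : List Char) : transCnt l.reverse = transCnt l := by
  induction l with
  | nil => rfl
  | cons c r ih =>
    rw [List.reverse_cons, transCnt_append, ih]
    cases r with
    | nil => simp [transCnt]
    | cons b s =>
      rw [show transCnt (c :: b :: s) = (if c ≠ b then 1 else 0) + transCnt (b :: s) from rfl]
      simp [List.getLast?_reverse]
      by_cases h : c = b <;> simp [h, Ne.symm] <;> ring

-- B's loop counts the transitions of prev :: rest
lemma solveLoopB_char (l : List Char) : ∀ (n : Int) (p : Char),
    (solveLoopB l n (some p)).1 = n + transCnt (p :: l) := by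
  induction l with
  | nil => intro n p; simp [solveLoopB, transCnt]
  | cons c r ih =>
    intro n p
    rw [show solveLoopB (c :: r) n (some p) = solveLoopB r (if decide (c ≠ p) then n + 1 else n) (some c) from rfl]
    rw [ih]
    rw [show transCnt (p :: c :: r) = (if p ≠ c then 1 else 0) + transCnt (c :: r) from rfl]
    by_cases h : c = p <;> simp [h, Ne.symm] <;> ring

lemma solveLoopB_nil_start (l : List Char) :
    (solveLoopB l 0 none).1 = transCnt l := by
  cases l with
  | nil => simp [solveLoopB, transCnt]
  | cons c r =>
    rw [show solveLoopB (c :: r) 0 none = solveLoopB r 0 (some c) from rfl]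
    rw [solveLoopB_char]
    simp

-- ===== VERDICT (by name: the statement is the Claim_ definition above) =====
theorem solve_spec : Claim_equal_solve := by
  intro S _
  unfold Spec_solve solve solve_alt
  set l := S.toList with hl
  have hA : solveLoopA l.reverse '-' '+' 0 = cnt (l.reverse.filter isPM) '-' := by
    have := solveLoopA_char l.reverse '-' 0 (Or.inr rfl)
    simpa [flipSymbol] using this
  set seq := l.filter isPM with hseq
  have hfilt : l.reverse.filter isPM = seq.reverse := by
    simp [List.filter_reverse, hseq]
  have hmem : ∀ c ∈ seq.reverse, isPM c := by
    intro c hc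
    simp only [List.mem_reverse, hseq, List.mem_filter] at hc
    exact hc.2
  rw [hA, hfilt, cnt_char seq.reverse '-' (Or.inr rfl) hmem, transCnt_reverse]
  rw [show seq.reverse.head? = seq.getLast? from List.head?_reverse]
  show _ = if seq ≠ [] ∧ seq.getLast? = some '-' then (solveLoopB seq 0 none).1 + 1 else (solveLoopB seq 0 none).1
  rw [solveLoopB_nil_start]
  cases hsq : seq with
  | nil => simp [transCnt]
  | cons a r =>
    simp only [ne_eq, reduceCtorEq, not_false_iff, true_and]
    by_cases hlast : (a :: r).getLast? = some '-'
    · simp [hlast]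
      try ring
    · simp [hlast]
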